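-- pv_equiv track=rewrite | github.com/gibl3/encrypt-decrypt | tap.py | tap_code
-- ===== SOURCE A (Python) =====
-- grid = ["ABCDE", "FGHIJ", "LMNOP", "QRSTU", "VWXYZ"]
--
-- def tap_code(message: str):
--     message = message.upper()
--     cipher_text = []
--
--     for letter in message:
--         if letter == "K":
--             letter = "C"
--
--         for cell in grid:
--             if letter in cell:
--                 row = grid.index(cell) + 1
--                 col = cell.index(letter) + 1
--                 cipher_text.append(f"{row},{col}")
--
--     return " ".join(cipher_text)
-- ===== SOURCE B (Python) =====
-- def tap_code(message: str):
--     # arithmetic tap-code: no grid scan; row/col computed from the letter's ordinal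
--     parts = []
--     for ch in message.upper():
--         if ch == "K":
--             ch = "C"
--         if "A" <= ch <= "Z":
--             i = ord(ch) - 65
--             if ch > "K":
--                 i -= 1
--             parts.append(f"{i // 5 + 1},{i % 5 + 1}")
--     return " ".join(parts)
-- ===== Notes on version B (the rewrite author's own statement) =====
-- stated objective: alternative
-- what changed: B drops the grid entirely: instead of scanning the 5x5 grid for each letter and reading row/col off list indices, it computes row and col arithmetically from the letter's ordinal (i = ord(ch)-65, minus 1 past K; row = i//5+1, col = i%5+1) in one pass.
import Mathlib
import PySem

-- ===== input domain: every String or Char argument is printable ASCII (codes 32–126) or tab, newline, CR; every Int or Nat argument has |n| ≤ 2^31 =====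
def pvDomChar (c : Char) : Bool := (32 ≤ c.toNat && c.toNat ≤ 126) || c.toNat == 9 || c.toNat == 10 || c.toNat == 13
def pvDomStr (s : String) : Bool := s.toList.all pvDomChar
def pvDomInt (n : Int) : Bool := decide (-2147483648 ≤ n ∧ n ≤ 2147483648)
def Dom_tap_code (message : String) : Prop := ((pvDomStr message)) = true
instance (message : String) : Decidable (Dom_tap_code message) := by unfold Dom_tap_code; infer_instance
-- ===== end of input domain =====

-- B replaces A's per-letter scan of the tap-code grid by direct arithmetic on the
-- letter's ordinal (row = i/5+1, col = i%5+1 with K folded into C); objective: simpler.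


-- ===== PORT A =====
def pyGrid : List (List Char) := [['A','B','C','D','E'], ['F','G','H','I','J'],
  ['L','M','N','O','P'], ['Q','R','S','T','U'], ['V','W','X','Y','Z']]

-- literal port of A: upper, loop over letters, inner loop scanning the grid,
-- 'letter in cell' = PySem.Chars.isIn, grid.index / cell.index = PySem.List.index?
-- (guarded by the membership test, so the .getD 0 default is never taken)
def tap_code (message : String) : String :=
  let msg := PySem.Chars.upper message.toList
  let cipher := msg.foldl (fun acc letter =>
    let letter := if letter = 'K' then 'C' else letter
    pyGrid.foldl (fun acc cell =>
      if PySem.Chars.isIn [letter] cell then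
        let row : Int := ((PySem.List.index? pyGrid cell).getD 0 : Int) + 1
        let col : Int := ((PySem.List.index? cell letter).getD 0 : Int) + 1
        acc ++ [PySem.Int.toStr row ++ "," ++ PySem.Int.toStr col]
      else acc) acc) ([] : List String)
  PySem.Str.join " " cipher

-- ===== PORT B =====
-- literal port of Source B: one pass, row/col by arithmetic on ord(ch)
def tap_code_alt (message : String) : String :=
  let parts := (PySem.Chars.upper message.toList).foldl (fun acc ch =>
    let ch := if ch = 'K' then 'C' else ch
    if 'A' ≤ ch ∧ ch ≤ 'Z' then
      let i : Int := (ch.toNat : Int) - 65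
      let i : Int := if 'K' < ch then i - 1 else i
      acc ++ [PySem.Int.toStr (PySem.Int.floordiv i 5 + 1) ++ "," ++
              PySem.Int.toStr (PySem.Int.mod i 5 + 1)]
    else acc) ([] : List String)
  PySem.Str.join " " parts

-- ===== PRECONDITION & SPEC =====
def Spec_tap_code (message : String) (out : String) : Prop := out = tap_code_alt message
instance (message : String) (out : String) : Decidable (Spec_tap_code message out) := by unfold Spec_tap_code; infer_instance

-- ===== CLAIM (what is proved, stated in full; the proofs are below) =====
def Claim_equal_tap_code : Prop := ∀ (message : String), Dom_tap_code message → Spec_tap_code message (tap_code message)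

-- ===== LEMMAS AND PROOFS =====

def pyAlpha : List Char := ['A','B','C','D','E','F','G','H','I','J','K','L','M',
  'N','O','P','Q','R','S','T','U','V','W','X','Y','Z']

-- A's inner grid loop, as a function of the (already remapped) letter
def stepA (letter : Char) : List String :=
  pyGrid.foldl (fun acc cell =>
    if PySem.Chars.isIn [letter] cell then
      let row : Int := ((PySem.List.index? pyGrid cell).getD 0 : Int) + 1
      let col : Int := ((PySem.List.index? cell letter).getD 0 : Int) + 1
      acc ++ [PySem.Int.toStr row ++ "," ++ PySem.Int.toStr col]
    else acc) ([] : List String)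

-- B's per-letter result (already remapped letter)
def stepB (ch : Char) : List String :=
  if 'A' ≤ ch ∧ ch ≤ 'Z' then
    let i : Int := (ch.toNat : Int) - 65
    let i : Int := if 'K' < ch then i - 1 else i
    [PySem.Int.toStr (PySem.Int.floordiv i 5 + 1) ++ "," ++
     PySem.Int.toStr (PySem.Int.mod i 5 + 1)]
  else []

lemma mem_alpha_of_range (c : Char) (h1 : 'A' ≤ c) (h2 : c ≤ 'Z') : c ∈ pyAlpha := by
  have hlo : 65 ≤ c.toNat := h1
  have hhi : c.toNat ≤ 90 := h2
  rw [← Char.ofNat_toNat c]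
  interval_cases hn : c.toNat <;> decide

lemma step_eq (c : Char) :
    stepA (if c = 'K' then 'C' else c) = stepB (if c = 'K' then 'C' else c) := by
  by_cases h : c ∈ pyAlpha
  · fin_cases h <;> decide
  · have hK : (if c = 'K' then 'C' else c) = c := by
      rw [if_neg]; intro hc; exact h (hc ▸ (by decide))
    rw [hK]
    have hB : stepB c = [] := by
      unfold stepB
      rw [if_neg]
      rintro ⟨h1, h2⟩
      exact h (mem_alpha_of_range c h1 h2)
    have hcell : ∀ cell : List Char, cell ⊆ pyAlpha → PySem.Chars.isIn [c] cell = false := by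
      intro cell hsub
      rw [PySem.Chars.isIn_eq_false_iff]
      intro hinf
      exact h (hsub (hinf.subset (by simp)))
    have e1 := hcell ['A','B','C','D','E'] (by decide)
    have e2 := hcell ['F','G','H','I','J'] (by decide)
    have e3 := hcell ['L','M','N','O','P'] (by decide)
    have e4 := hcell ['Q','R','S','T','U'] (by decide)
    have e5 := hcell ['V','W','X','Y','Z'] (by decide)
    rw [hB]
    unfold stepA
    simp [pyGrid, e1, e2, e3, e4, e5]

lemma foldl_stepA (l : List Char) (acc : List String) :
    l.foldl (fun acc letter =>
      let letter := if letter = 'K' then 'C' else letter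
      pyGrid.foldl (fun acc cell =>
        if PySem.Chars.isIn [letter] cell then
          let row : Int := ((PySem.List.index? pyGrid cell).getD 0 : Int) + 1
          let col : Int := ((PySem.List.index? cell letter).getD 0 : Int) + 1
          acc ++ [PySem.Int.toStr row ++ "," ++ PySem.Int.toStr col]
        else acc) acc) acc
    = acc ++ l.flatMap (fun letter => stepA (if letter = 'K' then 'C' else letter)) := by
  induction l generalizing acc with
  | nil => simp
  | cons x xs ih =>
    simp only [List.foldl_cons, List.flatMap_cons, ih, ← List.append_assoc]
    congr 1
    unfold stepA
    generalize (if x = 'K' then 'C' else x) = y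
    rw [show (fun (acc : List String) (cell : List Char) =>
        if PySem.Chars.isIn [y] cell then
          acc ++ [PySem.Int.toStr (((PySem.List.index? pyGrid cell).getD 0 : Int) + 1) ++ "," ++
                  PySem.Int.toStr (((PySem.List.index? cell y).getD 0 : Int) + 1)]
        else acc) = (fun acc cell => acc ++ (if PySem.Chars.isIn [y] cell then
          [PySem.Int.toStr (((PySem.List.index? pyGrid cell).getD 0 : Int) + 1) ++ "," ++
           PySem.Int.toStr (((PySem.List.index? cell y).getD 0 : Int) + 1)] else [])) from by
      funext acc cell; split <;> simp]
    rw [PySem.List.foldl_append_eq_flatMap, PySem.List.foldl_append_eq_flatMap]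
    simp

lemma foldl_stepB (l : List Char) (acc : List String) :
    l.foldl (fun acc ch =>
      let ch := if ch = 'K' then 'C' else ch
      if 'A' ≤ ch ∧ ch ≤ 'Z' then
        let i : Int := (ch.toNat : Int) - 65
        let i : Int := if 'K' < ch then i - 1 else i
        acc ++ [PySem.Int.toStr (PySem.Int.floordiv i 5 + 1) ++ "," ++
                PySem.Int.toStr (PySem.Int.mod i 5 + 1)]
      else acc) acc
    = acc ++ l.flatMap (fun ch => stepB (if ch = 'K' then 'C' else ch)) := by
  induction l generalizing acc with
  | nil => simp
  | cons x xs ih =>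
    simp only [List.foldl_cons, List.flatMap_cons, ih, ← List.append_assoc]
    congr 1
    unfold stepB
    split <;> (simp; try (split <;> simp))

-- ===== VERDICT (by name: the statement is the Claim_ definition above) =====
theorem tap_code_spec : Claim_equal_tap_code := by
  intro message _
  unfold Spec_tap_code tap_code tap_code_alt
  simp only [foldl_stepA, foldl_stepB, List.nil_append]
  rw [show (fun letter => stepA (if letter = 'K' then 'C' else letter))
        = (fun ch => stepB (if ch = 'K' then 'C' else ch)) from funext step_eq]
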